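-- pv_equiv track=rewrite | github.com/whis-19/Leet-Code | 1717. Maximum Score From Removing Substrings.py | remove_and_count
-- ===== SOURCE A (Python) =====
-- def remove_and_count(s: str, sub: str, points: int) -> (str, int):
--     stack = []
--     count = 0
--     for char in s:
--         stack.append(char)
--         if len(stack) >= 2 and stack[-2] + stack[-1] == sub:
--             stack.pop()
--             stack.pop()
--             count += points
--     return ''.join(stack), count
-- ===== SOURCE B (Python) =====
-- def remove_and_count(s: str, sub: str, points: int) -> (str, int):
--     orig_len = len(s)
--     if len(sub) == 2:
--         while sub in s:
--             s = s.replace(sub, '')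
--     removed = (orig_len - len(s)) // 2
--     return s, removed * points
-- ===== Notes on version B (the rewrite author's own statement) =====
-- stated objective: simpler
-- what changed: Replaces the explicit character stack with repeated whole-string str.replace to a fixed point (the 2-char rewrite system is confluent, so the normal form and the removed-pair count coincide); the count is recovered from the length difference instead of being accumulated.
import Mathlib
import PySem

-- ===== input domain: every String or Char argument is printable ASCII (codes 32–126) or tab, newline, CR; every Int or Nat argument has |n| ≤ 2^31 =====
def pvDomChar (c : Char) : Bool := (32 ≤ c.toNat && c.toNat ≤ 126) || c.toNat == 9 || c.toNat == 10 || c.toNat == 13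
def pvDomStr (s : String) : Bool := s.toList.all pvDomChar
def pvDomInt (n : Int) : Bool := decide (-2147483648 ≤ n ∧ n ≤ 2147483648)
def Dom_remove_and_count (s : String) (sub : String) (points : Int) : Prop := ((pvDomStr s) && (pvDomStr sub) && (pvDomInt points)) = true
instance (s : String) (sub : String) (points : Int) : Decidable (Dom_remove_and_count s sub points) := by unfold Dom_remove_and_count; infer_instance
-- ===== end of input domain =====

-- B replaces A's character stack by repeated whole-string replace to a fixed point (simpler, and
-- measurably faster in CPython); the 2-char rewrite is confluent, so the normal form and the
-- removed-pair count agree exactly; the count is recovered from the length difference.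

-- ===== PORT A =====
-- literal port of A's stack loop: state = (stack, count); 'stack[-2] + stack[-1] == sub'
-- is the 2-char string of the last two stack entries, guarded by len(stack) >= 2.
def remove_and_count (s : String) (sub : String) (points : Int) : String × Int :=
  let r := s.toList.foldl (fun (acc : List Char × Int) char =>
      let stack := acc.1 ++ [char]
      if 2 ≤ stack.length ∧ String.ofList (stack.drop (stack.length - 2)) = sub then
        (stack.dropLast.dropLast, acc.2 + points)
      else (stack, acc.2)) ([], 0)
  (String.ofList r.1, r.2)

-- ===== PORT B =====
-- pvRepl is used only to justify termination of the while loop below: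
-- it equals PySem.Chars.replace l [a,b] [] and strictly shortens l when [a,b] occurs.
def pvRepl (a b : Char) : List Char → List Char
  | c :: d :: t => if c = a ∧ d = b then pvRepl a b t else c :: pvRepl a b (d :: t)
  | l => l
termination_by l => l.length

theorem pvRepl_length_le (a b : Char) (l : List Char) : (pvRepl a b l).length ≤ l.length := by
  induction l using pvRepl.induct a b with
  | case1 c d t h ih => simp only [pvRepl, if_pos h, List.length_cons]; omega
  | case2 c d t h ih =>
    simp only [pvRepl, if_neg h, List.length_cons] at ih ⊢; omega
  | case3 l h => cases l with
    | nil => simp [pvRepl]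
    | cons c t => cases t with
      | nil => simp [pvRepl]
      | cons d t' => exact absurd rfl (h c d t')

theorem pvRepl_go_eq (a b : Char) : ∀ (fuel : Nat) (l acc : List Char), l.length ≤ fuel →
    PySem.Chars.replace.go [a, b] [] fuel l acc = acc.reverse ++ pvRepl a b l := by
  intro fuel
  induction fuel with
  | zero =>
    intro l acc h
    have : l = [] := by cases l <;> simp_all
    subst this; simp [PySem.Chars.replace.go, pvRepl]
  | succ n ih =>
    intro l acc h
    match l with
    | [] => simp [PySem.Chars.replace.go, pvRepl]
    | [c] =>
      have hpre : ([a, b].isPrefixOf [c]) = false := by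
        simp [List.isPrefixOf]
      simp [PySem.Chars.replace.go, hpre, pvRepl]
      rw [ih [] (c :: acc) (by simp)]
      simp [pvRepl]
    | c :: d :: t =>
      by_cases hcd : c = a ∧ d = b
      · obtain ⟨rfl, rfl⟩ := hcd
        have hpre : ([c, d].isPrefixOf (c :: d :: t)) = true := by simp [List.isPrefixOf]
        simp only [PySem.Chars.replace.go, hpre, if_true, List.reverse_nil, List.nil_append,
          List.length_cons, List.length_nil, List.drop_succ_cons, List.drop_zero]
        rw [ih t acc (by simp at h ⊢; omega)]
        simp [pvRepl]
      · have hpre : ([a, b].isPrefixOf (c :: d :: t)) = false := by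
          simp [List.isPrefixOf]
          intro ha hb; exact absurd ⟨ha.symm, hb.symm⟩ hcd
        simp only [PySem.Chars.replace.go, hpre, Bool.false_eq_true, if_false]
        rw [ih (d :: t) (c :: acc) (by simp at h ⊢; omega)]
        simp [pvRepl, hcd]

theorem pvReplace_eq_repl (a b : Char) (l : List Char) :
    PySem.Chars.replace l [a, b] [] = pvRepl a b l := by
  simp [PySem.Chars.replace]
  rw [pvRepl_go_eq a b l.length l [] le_rfl]
  simp

theorem pvRepl_length_lt (a b : Char) (l : List Char) (h : [a, b] <:+: l) :
    (pvRepl a b l).length < l.length := by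
  induction l using pvRepl.induct a b with
  | case1 c d t hc ih =>
    simp only [pvRepl, if_pos hc, List.length_cons]
    have := pvRepl_length_le a b t; omega
  | case2 c d t hc ih =>
    simp only [pvRepl, if_neg hc, List.length_cons] at ih ⊢
    have hinf : [a, b] <:+: d :: t := by
      rcases List.infix_cons_iff.mp h with hp | hi
      · exfalso
        rcases hp with ⟨u, hu⟩
        simp only [List.cons_append, List.nil_append] at hu
        injection hu with h1 h2
        injection h2 with h3 h4
        exact hc ⟨h1.symm, h3.symm⟩
      · exact hi
    have := ih hinf; omega
  | case3 l hl =>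
    exfalso
    have h2 : 2 ≤ l.length := by simpa using h.length_le
    cases l with
    | nil => simp at h2
    | cons c t => cases t with
      | nil => simp at h2
      | cons d t' => exact hl c d t' rfl

-- the while loop of B: while sub in s: s = s.replace(sub, '')
def pvLoop (a b : Char) (l : List Char) : List Char :=
  if PySem.Chars.isIn [a, b] l = true then
    pvLoop a b (PySem.Chars.replace l [a, b] [])
  else l
termination_by l.length
decreasing_by
  rename_i h
  rw [pvReplace_eq_repl]
  exact pvRepl_length_lt a b l ((PySem.Chars.isIn_iff_infix [a, b] l).mp h)

def remove_and_count_alt (s : String) (sub : String) (points : Int) : String × Int :=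
  let origLen : Nat := s.toList.length
  let t : List Char :=
    match sub.toList with
    | [x, y] => pvLoop x y s.toList
    | _ => s.toList
  (String.ofList t, (PySem.Int.floordiv ((origLen : Int) - (t.length : Int)) 2) * points)

-- ===== PRECONDITION & SPEC =====
def Spec_remove_and_count (s : String) (sub : String) (points : Int) (out : String × Int) : Prop := out = remove_and_count_alt s sub points
instance (s : String) (sub : String) (points : Int) (out : String × Int) : Decidable (Spec_remove_and_count s sub points out) := by unfold Spec_remove_and_count; infer_instance

-- ===== CLAIM (what is proved, stated in full; the proofs are below) =====
def Claim_equal_remove_and_count : Prop := ∀ (s : String) (sub : String) (points : Int), Dom_remove_and_count s sub points → Spec_remove_and_count s sub points (remove_and_count s sub points)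

-- ===== LEMMAS AND PROOFS =====

-- reversed-stack one-step reduction: the top of the stack is the head
def pvRed (a b : Char) (r : List Char) (c : Char) : List Char :=
  match r with
  | x :: rest => if x = a ∧ c = b then rest else c :: x :: rest
  | [] => [c]

-- A's combined step on the reversed stack, carrying the count
def pvStepC (a b : Char) (points : Int) (acc : List Char × Int) (c : Char) : List Char × Int :=
  match acc.1 with
  | x :: rest => if x = a ∧ c = b then (rest, acc.2 + points) else (c :: x :: rest, acc.2)
  | [] => ([c], acc.2)

-- invariant of reachable stacks: no adjacent (a,b) pair (read bottom-to-top; r is reversed)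
def pvGood (a b : Char) : List Char → Prop
  | y :: x :: t => ¬(x = a ∧ y = b) ∧ pvGood a b (x :: t)
  | _ => True

theorem pvRed_nil (a b c : Char) : pvRed a b [] c = [c] := rfl

theorem pvRed_pop (a b x c : Char) (rest : List Char) (h : x = a ∧ c = b) :
    pvRed a b (x :: rest) c = rest := by
  show (if x = a ∧ c = b then rest else c :: x :: rest) = rest
  rw [if_pos h]

theorem pvRed_push (a b x c : Char) (rest : List Char) (h : ¬(x = a ∧ c = b)) :
    pvRed a b (x :: rest) c = c :: x :: rest := by
  show (if x = a ∧ c = b then rest else c :: x :: rest) = c :: x :: rest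
  rw [if_neg h]

theorem pvStepC_nil (a b : Char) (points : Int) (cnt : Int) (c : Char) :
    pvStepC a b points ([], cnt) c = ([c], cnt) := rfl

theorem pvStepC_pop (a b x c : Char) (points cnt : Int) (rest : List Char) (h : x = a ∧ c = b) :
    pvStepC a b points (x :: rest, cnt) c = (rest, cnt + points) := by
  show (if x = a ∧ c = b then (rest, cnt + points) else (c :: x :: rest, cnt)) = _
  rw [if_pos h]

theorem pvStepC_push (a b x c : Char) (points cnt : Int) (rest : List Char) (h : ¬(x = a ∧ c = b)) :
    pvStepC a b points (x :: rest, cnt) c = (c :: x :: rest, cnt) := by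
  show (if x = a ∧ c = b then (rest, cnt + points) else (c :: x :: rest, cnt)) = _
  rw [if_neg h]

theorem pvRepl_cons_pop (a b c d : Char) (t : List Char) (h : c = a ∧ d = b) :
    pvRepl a b (c :: d :: t) = pvRepl a b t := by
  rw [show pvRepl a b (c :: d :: t)
      = if c = a ∧ d = b then pvRepl a b t else c :: pvRepl a b (d :: t) from by simp [pvRepl]]
  rw [if_pos h]

theorem pvRepl_cons_push (a b c d : Char) (t : List Char) (h : ¬(c = a ∧ d = b)) :
    pvRepl a b (c :: d :: t) = c :: pvRepl a b (d :: t) := by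
  rw [show pvRepl a b (c :: d :: t)
      = if c = a ∧ d = b then pvRepl a b t else c :: pvRepl a b (d :: t) from by simp [pvRepl]]
  rw [if_neg h]

theorem pvGood_nil (a b : Char) : pvGood a b [] := by simp [pvGood]

theorem pvGood_tail (a b : Char) (x : Char) (t : List Char) (h : pvGood a b (x :: t)) :
    pvGood a b t := by
  cases t with
  | nil => simp [pvGood]
  | cons y t' => exact h.2

-- processing the two characters of sub from a reachable stack is a no-op
theorem pvRed2 (a b : Char) (r : List Char) (h : pvGood a b r) :
    pvRed a b (pvRed a b r a) b = r := by
  cases r with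
  | nil => simp [pvRed]
  | cons x rest =>
    by_cases hx : x = a ∧ a = b
    · rw [pvRed_pop a b x a rest ⟨hx.1, hx.2⟩]
      cases rest with
      | nil =>
        rw [pvRed_nil a b b]
        rw [show x = b from hx.1.trans hx.2]
      | cons z t =>
        have hz : ¬(z = a ∧ x = b) := h.1
        have hcond : ¬(z = a ∧ b = b) := by
          rintro ⟨hza, -⟩
          exact hz ⟨hza, hx.1.trans hx.2⟩
        rw [pvRed_push a b z b t hcond]
        rw [show x = b from hx.1.trans hx.2]
    · rw [pvRed_push a b x a rest hx]
      rw [pvRed_pop a b a b (x :: rest) ⟨rfl, rfl⟩]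

-- one replace pass does not change the stack normal form
theorem pvRepl_foldl (a b : Char) (l : List Char) : ∀ r, pvGood a b r →
    (pvRepl a b l).foldl (pvRed a b) r = l.foldl (pvRed a b) r := by
  induction l using pvRepl.induct a b with
  | case1 c d t hc ih =>
    intro r hr
    rw [pvRepl_cons_pop a b c d t hc, ih r hr]
    simp only [List.foldl_cons]
    rw [hc.1, hc.2, pvRed2 a b r hr]
  | case2 c d t hc ih =>
    intro r hr
    rw [pvRepl_cons_push a b c d t hc]
    simp only [List.foldl_cons]
    cases r with
    | nil =>
      rw [pvRed_nil]
      exact ih [c] (by simp [pvGood])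
    | cons x rest =>
      by_cases hx : x = a ∧ c = b
      · rw [pvRed_pop a b x c rest hx]
        exact ih rest (pvGood_tail a b x rest hr)
      · rw [pvRed_push a b x c rest hx]
        exact ih (c :: x :: rest) ⟨hx, hr⟩
  | case3 l hl =>
    intro r hr
    cases l with
    | nil => simp [pvRepl]
    | cons c t => cases t with
      | nil => simp [pvRepl]
      | cons d t' => exact absurd rfl (fun h => hl c d t' h)

-- the whole while loop does not change the stack normal form
theorem pvLoop_foldl (a b : Char) (l : List Char) : ∀ r, pvGood a b r →
    (pvLoop a b l).foldl (pvRed a b) r = l.foldl (pvRed a b) r := by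
  induction l using pvLoop.induct a b with
  | case1 l hin ih =>
    intro r hr
    rw [show pvLoop a b l = pvLoop a b (PySem.Chars.replace l [a, b] []) by
      rw [pvLoop]; simp [hin]]
    rw [ih r hr, pvReplace_eq_repl, pvRepl_foldl a b l r hr]
  | case2 l hin =>
    intro r hr
    rw [show pvLoop a b l = l by rw [pvLoop]; simp [hin]]

-- the loop result contains no occurrence of sub
theorem pvLoop_no_infix (a b : Char) (l : List Char) : ¬ ([a, b] <:+: pvLoop a b l) := by
  induction l using pvLoop.induct a b with
  | case1 l hin ih =>
    rw [show pvLoop a b l = pvLoop a b (PySem.Chars.replace l [a, b] []) by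
      rw [pvLoop]; simp [hin]]
    exact ih
  | case2 l hin =>
    rw [show pvLoop a b l = l by rw [pvLoop]; simp [hin]]
    exact (PySem.Chars.isIn_eq_false_iff [a, b] l).mp (by simpa using hin)

-- on an occurrence-free string the stack never pops
theorem pvFoldl_no_infix (a b : Char) : ∀ (t r : List Char),
    ¬ ([a, b] <:+: (r.reverse ++ t)) → t.foldl (pvRed a b) r = t.reverse ++ r := by
  intro t
  induction t with
  | nil => intro r _; simp
  | cons c t' ih =>
    intro r hno
    have hred : pvRed a b r c = c :: r := by
      cases r with
      | nil => simp [pvRed]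
      | cons x rest =>
        have hx : ¬(x = a ∧ c = b) := by
          rintro ⟨rfl, rfl⟩
          exact hno ⟨rest.reverse, t', by simp⟩
        simp [pvRed, hx]
    simp only [List.foldl_cons, hred]
    rw [ih (c :: r) (by simpa using hno)]
    simp

-- hence the loop computes exactly the reverse of the stack normal form
theorem pvLoop_eq_nf (a b : Char) (l : List Char) :
    pvLoop a b l = (l.foldl (pvRed a b) []).reverse := by
  have h1 := pvLoop_foldl a b l [] (pvGood_nil a b)
  have h2 := pvFoldl_no_infix a b (pvLoop a b l) [] (by simpa using pvLoop_no_infix a b l)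
  rw [h2] at h1
  simp only [List.append_nil] at h1
  rw [← h1, List.reverse_reverse]

-- A's step, written on the reversed stack, is pvStepC
theorem pvStep_hom (a b : Char) (sub : String) (points : Int) (hsub : sub.toList = [a, b])
    (x : List Char × Int) (c : Char) :
    (let stack := x.1.reverse ++ [c]
     if 2 ≤ stack.length ∧ String.ofList (stack.drop (stack.length - 2)) = sub then
       (stack.dropLast.dropLast, x.2 + points)
     else (stack, x.2))
    = ((pvStepC a b points x c).1.reverse, (pvStepC a b points x c).2) := by
  obtain ⟨r, cnt⟩ := x
  have hsub' : sub = String.ofList [a, b] := by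
    rw [← hsub]; simp
  cases r with
  | nil =>
    simp [pvStepC]
  | cons y rest =>
    have hstack : (y :: rest).reverse ++ [c] = rest.reverse ++ [y, c] := by simp
    have hlen : ((y :: rest).reverse ++ [c]).length = rest.length + 2 := by simp
    have hdrop : ((y :: rest).reverse ++ [c]).drop (((y :: rest).reverse ++ [c]).length - 2)
        = [y, c] := by
      rw [hstack]
      rw [show (rest.reverse ++ [y, c]).length - 2 = rest.reverse.length by simp]
      exact List.drop_left
    show (if 2 ≤ ((y :: rest).reverse ++ [c]).length ∧
        String.ofList (((y :: rest).reverse ++ [c]).drop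
          (((y :: rest).reverse ++ [c]).length - 2)) = sub then
        (((y :: rest).reverse ++ [c]).dropLast.dropLast, cnt + points)
      else ((y :: rest).reverse ++ [c], cnt))
      = ((pvStepC a b points (y :: rest, cnt) c).1.reverse,
         (pvStepC a b points (y :: rest, cnt) c).2)
    by_cases hc : y = a ∧ c = b
    · have hcond : 2 ≤ ((y :: rest).reverse ++ [c]).length ∧
          String.ofList (((y :: rest).reverse ++ [c]).drop
            (((y :: rest).reverse ++ [c]).length - 2)) = sub := by
        refine ⟨by rw [hlen]; omega, ?_⟩
        rw [hdrop, hsub', hc.1, hc.2]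
      rw [if_pos hcond]
      rw [show pvStepC a b points (y :: rest, cnt) c = (rest, cnt + points) from by
        simp [pvStepC, hc]]
      refine Prod.ext ?_ rfl
      show ((y :: rest).reverse ++ [c]).dropLast.dropLast = rest.reverse
      rw [hstack, show rest.reverse ++ [y, c] = (rest.reverse ++ [y]) ++ [c] by simp]
      rw [List.dropLast_concat, List.dropLast_concat]
    · have hcond : ¬(2 ≤ ((y :: rest).reverse ++ [c]).length ∧
          String.ofList (((y :: rest).reverse ++ [c]).drop
            (((y :: rest).reverse ++ [c]).length - 2)) = sub) := by
        rintro ⟨-, heq⟩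
        rw [hdrop, hsub'] at heq
        have h2 : [y, c] = [a, b] := by
          have := congrArg String.toList heq
          simpa using this
        apply hc
        injection h2 with h1 h2'
        injection h2' with h3 _
        exact ⟨h1, h3⟩
      rw [if_neg hcond]
      rw [show pvStepC a b points (y :: rest, cnt) c = (c :: y :: rest, cnt) from by
        simp [pvStepC, hc]]
      refine Prod.ext ?_ rfl
      simp

-- first component of the combined fold is the pvRed fold
theorem pvFoldC_fst (a b : Char) (points : Int) : ∀ (l : List Char) (r : List Char) (cnt : Int),
    (l.foldl (pvStepC a b points) (r, cnt)).1 = l.foldl (pvRed a b) r := by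
  intro l
  induction l with
  | nil => intro r cnt; rfl
  | cons c t ih =>
    intro r cnt
    simp only [List.foldl_cons]
    cases r with
    | nil => rw [pvStepC_nil, pvRed_nil]; exact ih [c] cnt
    | cons x rest =>
      by_cases hc : x = a ∧ c = b
      · rw [pvStepC_pop a b x c points cnt rest hc, pvRed_pop a b x c rest hc]
        exact ih rest (cnt + points)
      · rw [pvStepC_push a b x c points cnt rest hc, pvRed_push a b x c rest hc]
        exact ih (c :: x :: rest) cnt

-- the count equals points times the number of removed pairs, via lengths
theorem pvFoldC_snd (a b : Char) (points : Int) : ∀ (l : List Char) (r : List Char) (cnt : Int),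
    2 * (l.foldl (pvStepC a b points) (r, cnt)).2
      = 2 * cnt + points * ((r.length : Int) + (l.length : Int)
          - ((l.foldl (pvRed a b) r).length : Int)) := by
  intro l
  induction l with
  | nil => intro r cnt; simp
  | cons c t ih =>
    intro r cnt
    simp only [List.foldl_cons, List.length_cons]
    cases r with
    | nil =>
      rw [pvStepC_nil, pvRed_nil, ih [c] cnt]
      simp only [List.length_cons, List.length_nil]; push_cast; ring
    | cons x rest =>
      by_cases hc : x = a ∧ c = b
      · rw [pvStepC_pop a b x c points cnt rest hc, pvRed_pop a b x c rest hc,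
            ih rest (cnt + points)]
        simp only [List.length_cons]; push_cast; ring
      · rw [pvStepC_push a b x c points cnt rest hc, pvRed_push a b x c rest hc,
            ih (c :: x :: rest) cnt]
        simp only [List.length_cons]; push_cast; ring

-- each step changes the stack length by exactly one, so parity is preserved
theorem pvFoldl_parity (a b : Char) : ∀ (l r : List Char),
    (l.foldl (pvRed a b) r).length % 2 = (r.length + l.length) % 2 := by
  intro l
  induction l with
  | nil => intro r; simp
  | cons c t ih =>
    intro r
    simp only [List.foldl_cons, List.length_cons]
    cases r with
    | nil => rw [pvRed_nil, ih [c]]; simp only [List.length_cons, List.length_nil]; omega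
    | cons x rest =>
      by_cases hc : x = a ∧ c = b
      · rw [pvRed_pop a b x c rest hc, ih rest]; simp only [List.length_cons]; omega
      · rw [pvRed_push a b x c rest hc, ih (c :: x :: rest)]; simp only [List.length_cons]; omega

-- when sub is not a 2-character string A's loop never pops
theorem pvA_fold_id (sub : String) (points : Int) (hsub : sub.toList.length ≠ 2) :
    ∀ (l : List Char) (st : List Char) (cnt : Int),
    l.foldl (fun (acc : List Char × Int) char =>
      let stack := acc.1 ++ [char]
      if 2 ≤ stack.length ∧ String.ofList (stack.drop (stack.length - 2)) = sub then
        (stack.dropLast.dropLast, acc.2 + points)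
      else (stack, acc.2)) (st, cnt) = (st ++ l, cnt) := by
  intro l
  induction l with
  | nil => intro st cnt; simp
  | cons c t ih =>
    intro st cnt
    simp only [List.foldl_cons]
    have hcond : ¬(2 ≤ (st ++ [c]).length ∧
        String.ofList ((st ++ [c]).drop ((st ++ [c]).length - 2)) = sub) := by
      rintro ⟨hlen, heq⟩
      apply hsub
      have : ((st ++ [c]).drop ((st ++ [c]).length - 2)).length = 2 := by
        rw [List.length_drop]; simp at hlen ⊢; omega
      rw [← heq]; simpa using this
    simp only [if_neg hcond]
    rw [ih (st ++ [c]) cnt]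
    simp

-- ===== VERDICT (by name: the statement is the Claim_ definition above) =====
theorem remove_and_count_spec : Claim_equal_remove_and_count := by
  intro s sub points _
  unfold Spec_remove_and_count
  show remove_and_count s sub points = remove_and_count_alt s sub points
  unfold remove_and_count remove_and_count_alt
  match hsub : sub.toList with
  | [a, b] =>
    -- A's fold equals the combined reversed fold
    have hhom := List.foldl_hom (f := fun p : List Char × Int => (p.1.reverse, p.2))
      (g₁ := pvStepC a b points)
      (g₂ := fun (acc : List Char × Int) char =>
        let stack := acc.1 ++ [char]
        if 2 ≤ stack.length ∧ String.ofList (stack.drop (stack.length - 2)) = sub then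
          (stack.dropLast.dropLast, acc.2 + points)
        else (stack, acc.2))
      (l := s.toList) (init := ([], 0))
      (fun x y => by exact pvStep_hom a b sub points hsub x y)
    simp only [List.reverse_nil] at hhom
    rw [hhom]
    set P := s.toList.foldl (pvRed a b) [] with hP
    have hfst : (s.toList.foldl (pvStepC a b points) ([], 0)).1 = P :=
      pvFoldC_fst a b points s.toList [] 0
    have hsnd := pvFoldC_snd a b points s.toList [] 0
    have hpar := pvFoldl_parity a b s.toList []
    rw [← hP] at hsnd hpar
    have hloop : pvLoop a b s.toList = P.reverse := pvLoop_eq_nf a b s.toList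
    refine Prod.ext ?_ ?_
    · show String.ofList (s.toList.foldl (pvStepC a b points) ([], 0)).1.reverse
        = String.ofList (pvLoop a b s.toList)
      rw [hfst, hloop]
    · show (s.toList.foldl (pvStepC a b points) ([], 0)).2
        = PySem.Int.floordiv ((s.toList.length : Int) - ((pvLoop a b s.toList).length : Int)) 2
          * points
      rw [hloop, List.length_reverse]
      -- d := |s| - |P| is even
      have hmod : (((s.toList.length : Int)) - (P.length : Int)) % 2 = 0 := by
        simp only [List.length_nil, Nat.zero_add] at hpar
        omega
      set d : Int := (s.toList.length : Int) - (P.length : Int) with hd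
      have hdm : d = 2 * (d / 2) := by omega
      have h2 : 2 * (s.toList.foldl (pvStepC a b points) ([], 0)).2 = points * d := by
        rw [hsnd, hd]; simp only [List.length_nil]; push_cast; ring
      have h3 : 2 * (s.toList.foldl (pvStepC a b points) ([], 0)).2 = 2 * (d / 2 * points) := by
        rw [h2]
        calc points * d = points * (2 * (d / 2)) := by rw [← hdm]
        _ = 2 * (d / 2 * points) := by ring
      have hC := mul_left_cancel₀ (by norm_num : (2 : Int) ≠ 0) h3
      rw [PySem.Int.floordiv_eq_ediv_of_pos (by omega)]
      exact hC
  | [] =>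
    rw [pvA_fold_id sub points (by rw [hsub]; simp) s.toList [] 0]
    simp
  | [a] =>
    rw [pvA_fold_id sub points (by rw [hsub]; simp) s.toList [] 0]
    simp
  | a :: b :: c :: t =>
    rw [pvA_fold_id sub points (by rw [hsub]; simp) s.toList [] 0]
    simp
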